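-- pv_equiv track=rewrite | github.com/Ashadowkhan/VUDENCAI | Code/51MakeBlocks.py | previoussplit
-- ===== SOURCE A (Python) =====
-- def previoussplit(sourcecode,focus):
--   splitchars = [" ","\t","\n", ".", ":", "(", ")", "[", "]", "<", ">", "+", "-", "=","\"", "\'","*", "/","\\","~","{","}","!","?","*",";",",","%","&"]
--   pos = focus-1
--   while(pos >= 0):
--       if sourcecode[pos] in splitchars:
--         return pos
--       pos = pos-1
--   return -1
-- ===== SOURCE B (Python) =====
-- def previoussplit(sourcecode, focus):
--   splitchars = " \t\n.:()[]<>+-=\"'*/\\~{}!?*;,%&"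
--   prefix = sourcecode[:max(focus, 0)]
--   best = -1
--   for c in splitchars:
--     best = max(best, prefix.rfind(c))
--   return best
-- ===== Notes on version B (the rewrite author's own statement) =====
-- stated objective: faster
-- what changed: Replaces A's single right-to-left per-character scan (membership test per character in interpreted Python) by one str.rfind pass per split character over the prefix sourcecode[:focus], reduced with max.
import Mathlib
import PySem

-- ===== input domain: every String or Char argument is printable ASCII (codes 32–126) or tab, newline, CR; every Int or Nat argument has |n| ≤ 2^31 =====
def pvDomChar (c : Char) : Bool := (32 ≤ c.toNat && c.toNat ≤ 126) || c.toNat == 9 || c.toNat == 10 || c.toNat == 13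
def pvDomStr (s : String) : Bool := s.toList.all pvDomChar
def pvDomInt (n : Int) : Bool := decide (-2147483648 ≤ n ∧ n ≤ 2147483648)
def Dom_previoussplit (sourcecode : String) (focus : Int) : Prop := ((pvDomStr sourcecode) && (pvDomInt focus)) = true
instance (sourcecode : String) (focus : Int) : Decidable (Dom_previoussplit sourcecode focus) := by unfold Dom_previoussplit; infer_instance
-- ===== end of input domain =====

-- B replaces A's single right-to-left per-character scan by one str.rfind pass per
-- split character over the prefix sourcecode[:focus], reduced with max (the timing
-- run measured B faster: C-level rfind passes instead of a per-character loop).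


-- ===== PORT A =====
-- A's splitchars list (Python list literal, '*' appears twice as in the source)
def pvSplitcharsA : List Char :=
  [' ', '\t', '\n', '.', ':', '(', ')', '[', ']', '<', '>', '+', '-', '=', '"', '\'',
   '*', '/', '\\', '~', '{', '}', '!', '?', '*', ';', ',', '%', '&']

-- the 'while pos >= 0' loop of A; pyGet? = none is Python's IndexError (excluded by Pre_),
-- the -2 returned there is never claimed about
def previoussplitGo (cs : List Char) (pos : Int) : Int :=
  if h : 0 ≤ pos then
    match PySem.List.pyGet? cs pos with
    | some c => if c ∈ pvSplitcharsA then pos else previoussplitGo cs (pos - 1)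
    | none => -2
  else -1
termination_by (pos + 1).toNat
decreasing_by omega

def previoussplit (sourcecode : String) (focus : Int) : Int :=
  previoussplitGo sourcecode.toList (focus - 1)

-- ===== PORT B =====
-- B's splitchars string (same characters as A's list)
def pvSplitcharsB : List Char :=
  (" \t\n.:()[]<>+-=\"'*/\\~{}!?*;,%&").toList

def previoussplit_alt (sourcecode : String) (focus : Int) : Int :=
  let pre := PySem.List.slice sourcecode.toList none (some (max focus 0))
  pvSplitcharsB.foldl (fun best c => max best (PySem.Chars.rfind pre [c])) (-1)

-- ===== PRECONDITION & SPEC =====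
-- Pre_ excludes exactly the inputs where A raises IndexError: focus-1 is a read
-- past the end of sourcecode (focus > len(sourcecode)).
def Pre_previoussplit (sourcecode : String) (focus : Int) : Prop :=
  focus ≤ sourcecode.toList.length
instance (sourcecode : String) (focus : Int) : Decidable (Pre_previoussplit sourcecode focus) := by
  unfold Pre_previoussplit; infer_instance

def pvWitness_previoussplit : String × Int := ("a.b", 3)

def Spec_previoussplit (sourcecode : String) (focus : Int) (out : Int) : Prop :=
  out = previoussplit_alt sourcecode focus
instance (sourcecode : String) (focus : Int) (out : Int) : Decidable (Spec_previoussplit sourcecode focus out) := by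
  unfold Spec_previoussplit; infer_instance

-- ===== CLAIM (what is proved, stated in full; the proofs are below) =====
def Claim_equal_previoussplit : Prop := ∀ (sourcecode : String) (focus : Int), Dom_previoussplit sourcecode focus → Pre_previoussplit sourcecode focus → Spec_previoussplit sourcecode focus (previoussplit sourcecode focus)

-- ===== LEMMAS AND PROOFS =====

-- membership test at index i (false when out of range), against A's char list
def pvMemChk (cs : List Char) (i : Nat) : Bool :=
  match cs[i]? with
  | some a => a ∈ pvSplitcharsA
  | none => false

-- "greatest index ≤ j holding a split char, else -1": common spec of both loops
def pvGoMem (cs : List Char) : Nat → Int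
  | 0 => if pvMemChk cs 0 then 0 else -1
  | j+1 => if pvMemChk cs (j+1) then ((j : Int)+1) else pvGoMem cs j

theorem pv_AB : pvSplitcharsB = pvSplitcharsA := by decide

theorem pv_singleton_isPrefixOf (c : Char) (xs : List Char) :
    [c].isPrefixOf xs = true ↔ xs.head? = some c := by
  cases xs with
  | nil => simp [List.isPrefixOf]
  | cons h t =>
      simp only [List.isPrefixOf, List.head?_cons, Option.some_inj, Bool.and_eq_true, beq_iff_eq]
      constructor
      · intro he; exact he.1.symm
      · intro he; subst he; simp

theorem pv_go_zero (p : List Char) (c : Char) :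
    PySem.Chars.rfind.go p [c] 0 = (if [c].isPrefixOf p then (0:Int) else -1) := by
  rw [PySem.Chars.rfind.go]

theorem pv_go_succ (p : List Char) (c : Char) (j : Nat) :
    PySem.Chars.rfind.go p [c] (j+1) =
      (if [c].isPrefixOf (p.drop (j+1)) then ((j:Int)+1) else PySem.Chars.rfind.go p [c] j) := by
  rw [PySem.Chars.rfind.go]; push_cast; ring_nf

theorem pv_go_le (p : List Char) (c : Char) (j : Nat) :
    PySem.Chars.rfind.go p [c] j ≤ (j : Int) := by
  induction j with
  | zero => rw [pv_go_zero]; split <;> omega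
  | succ j ih => rw [pv_go_succ]; split <;> [omega; exact le_trans ih (by omega)]

theorem pv_foldl_max_le (l : List Char) (f : Char → Int) (acc B : Int)
    (h0 : acc ≤ B) (h : ∀ x ∈ l, f x ≤ B) :
    l.foldl (fun a x => max a (f x)) acc ≤ B := by
  induction l generalizing acc with
  | nil => exact h0
  | cons x t ih =>
      exact ih (max acc (f x))
        (max_le h0 (h x (List.mem_cons_self)))
        (fun y hy => h y (List.mem_cons_of_mem _ hy))

-- B's fold of per-char rfind passes computes pvGoMem
theorem pv_fold_eq_goMem (p : List Char) (j : Nat) :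
    pvSplitcharsB.foldl (fun best c => max best (PySem.Chars.rfind.go p [c] j)) (-1)
      = pvGoMem p j := by
  induction j with
  | zero =>
      by_cases hm : pvMemChk p 0 = true
      · have hm0 := hm
        unfold pvMemChk at hm
        cases hp : p[0]? with
        | none => rw [hp] at hm; simp at hm
        | some a =>
            rw [hp] at hm; simp only at hm
            have ha : a ∈ pvSplitcharsA := by simpa using hm
            have hgo : PySem.Chars.rfind.go p [a] 0 = 0 := by
              rw [pv_go_zero, if_pos]
              rw [pv_singleton_isPrefixOf, List.head?_eq_getElem?]
              exact hp
            have hub : ∀ c ∈ pvSplitcharsB,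
                PySem.Chars.rfind.go p [c] 0 ≤ (0:Int) := fun c _ => pv_go_le p c 0
            have hle := pv_foldl_max_le pvSplitcharsB
              (fun c => PySem.Chars.rfind.go p [c] 0) (-1) 0 (by omega) hub
            have hmem : a ∈ pvSplitcharsB := pv_AB ▸ ha
            have hge := (PySem.List.le_foldl_max_int pvSplitcharsB
              (fun c => PySem.Chars.rfind.go p [c] 0) (-1)).2 a hmem
            rw [hgo] at hge
            simp only at hle hge
            simp only [pvGoMem, hm0, if_true]
            omega
      · have hrw : ∀ (best : Int), ∀ c ∈ pvSplitcharsB,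
            max best (PySem.Chars.rfind.go p [c] 0) = max best (-1) := by
          intro best c hc
          congr 1
          rw [pv_go_zero, if_neg]
          intro hpre
          rw [pv_singleton_isPrefixOf] at hpre
          rw [List.head?_eq_getElem?] at hpre
          unfold pvMemChk at hm
          rw [hpre] at hm
          simp only at hm
          exact hm (by simpa using (pv_AB ▸ hc))
        rw [PySem.List.foldl_congr_mem pvSplitcharsB _ _ (-1) hrw]
        have : ∀ acc : Int, -1 ≤ acc → pvSplitcharsB.foldl (fun a (_ : Char) => max a (-1)) acc = acc := by
          intro acc hacc
          induction pvSplitcharsB with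
          | nil => rfl
          | cons x t ih => simp only [List.foldl_cons, max_eq_left hacc]; exact ih
        simp only [pvGoMem, hm]
        exact this (-1) (le_refl _)
  | succ j ih =>
      by_cases hm : pvMemChk p (j+1) = true
      · have hm0 := hm
        unfold pvMemChk at hm
        cases hp : p[j+1]? with
        | none => rw [hp] at hm; simp at hm
        | some a =>
            rw [hp] at hm; simp only at hm
            have ha : a ∈ pvSplitcharsA := by simpa using hm
            have hgo : PySem.Chars.rfind.go p [a] (j+1) = (j:Int)+1 := by
              rw [pv_go_succ, if_pos]
              rw [pv_singleton_isPrefixOf, List.head?_drop]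
              exact hp
            have hub : ∀ c ∈ pvSplitcharsB,
                PySem.Chars.rfind.go p [c] (j+1) ≤ ((j:Int)+1) := by
              intro c _; have := pv_go_le p c (j+1); push_cast at this ⊢; omega
            have hle := pv_foldl_max_le pvSplitcharsB
              (fun c => PySem.Chars.rfind.go p [c] (j+1)) (-1) ((j:Int)+1) (by omega) hub
            have hmem : a ∈ pvSplitcharsB := pv_AB ▸ ha
            have hge := (PySem.List.le_foldl_max_int pvSplitcharsB
              (fun c => PySem.Chars.rfind.go p [c] (j+1)) (-1)).2 a hmem
            rw [hgo] at hge
            simp only at hle hge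
            simp only [pvGoMem, hm0, if_true]
            omega
      · have hrw : ∀ (best : Int), ∀ c ∈ pvSplitcharsB,
            max best (PySem.Chars.rfind.go p [c] (j+1)) = max best (PySem.Chars.rfind.go p [c] j) := by
          intro best c hc
          congr 1
          rw [pv_go_succ, if_neg]
          intro hpre
          rw [pv_singleton_isPrefixOf, List.head?_drop] at hpre
          unfold pvMemChk at hm
          rw [hpre] at hm
          simp only at hm
          exact hm (by simpa using (pv_AB ▸ hc))
        rw [PySem.List.foldl_congr_mem pvSplitcharsB _ _ (-1) hrw]
        simp only [pvGoMem, hm]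
        exact ih

-- membership checks below n agree on take n / take (n+1)
theorem pv_goMem_take_succ (cs : List Char) (n j : Nat) (hj : j ≤ n)
    (hn : pvMemChk (cs.take (n+1)) n = pvMemChk (cs.take n) n) :
    pvGoMem (cs.take (n+1)) j = pvGoMem (cs.take n) j := by
  induction j with
  | zero =>
      have : pvMemChk (cs.take (n+1)) 0 = pvMemChk (cs.take n) 0 := by
        by_cases h : n = 0
        · subst h; exact hn
        · unfold pvMemChk
          rw [List.getElem?_take_of_lt (by omega), List.getElem?_take_of_lt (by omega)]
      simp only [pvGoMem, this]
  | succ j ihj =>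
      have hlt : j + 1 ≤ n := hj
      have hch : pvMemChk (cs.take (n+1)) (j+1) = pvMemChk (cs.take n) (j+1) := by
        by_cases h : j + 1 = n
        · subst h; exact hn
        · unfold pvMemChk
          rw [List.getElem?_take_of_lt (by omega), List.getElem?_take_of_lt (by omega)]
      simp only [pvGoMem, hch]
      split
      · rfl
      · exact ihj (by omega)

-- A's backward scan, started at n-1 with n ≤ len, computes pvGoMem on take n
theorem pv_loopA_eq_goMem (cs : List Char) (n : Nat) (hn : n ≤ cs.length) :
    previoussplitGo cs ((n : Int) - 1) = pvGoMem (cs.take n) n := by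
  induction n with
  | zero =>
      rw [previoussplitGo]
      simp only [pvGoMem, pvMemChk]
      norm_num
  | succ n ihn =>
      have hlen : n < cs.length := by omega
      have hget : PySem.List.pyGet? cs ((n : Int) + 1 - 1) = some cs[n] := by
        have : ((n : Int) + 1 - 1) = (n : Int) := by omega
        rw [this]
        rw [PySem.List.pyGet?_natCast, List.getElem?_eq_getElem hlen]
      have hchk_out : pvMemChk (cs.take (n+1)) (n+1) = false := by
        unfold pvMemChk
        rw [List.getElem?_eq_none (by rw [List.length_take]; omega)]
      have hchk_n : (cs.take (n+1))[n]? = some cs[n] := by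
        rw [List.getElem?_take_of_lt (by omega), List.getElem?_eq_getElem hlen]
      rw [previoussplitGo]
      rw [dif_pos (by push_cast; omega)]
      push_cast
      rw [hget]
      simp only
      by_cases hmem : cs[n] ∈ pvSplitcharsA
      · rw [if_pos hmem]
        have hchkn : pvMemChk (cs.take (n+1)) n = true := by
          unfold pvMemChk
          rw [hchk_n]
          simpa using hmem
        cases n with
        | zero =>
            simp only [pvGoMem, hchk_out, Bool.false_eq_true, if_false, hchkn, if_true]
            norm_num
        | succ m =>
            simp only [pvGoMem, hchk_out, Bool.false_eq_true, if_false, hchkn, if_true]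
            push_cast
            ring
      · rw [if_neg hmem]
        have h1 : ((n : Int) + 1 - 1 - 1) = (n : Int) - 1 := by omega
        rw [h1, ihn (by omega)]
        have hchk_nA : pvMemChk (cs.take (n+1)) n = pvMemChk (cs.take n) n := by
          unfold pvMemChk
          rw [hchk_n, List.getElem?_eq_none (by simp)]
          simp [hmem]
        have hTS := pv_goMem_take_succ cs n n (le_refl n) hchk_nA
        simp only [pvGoMem, hchk_out, Bool.false_eq_true, if_false]
        exact hTS.symm

-- ===== VERDICT (by name: the statement is the Claim_ definition above) =====
theorem previoussplit_spec : Claim_equal_previoussplit := by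
  intro s focus _ hpre
  simp only [Spec_previoussplit, previoussplit, previoussplit_alt]
  unfold Pre_previoussplit at hpre
  by_cases hf : focus ≤ 0
  · have hmax : max focus 0 = 0 := by omega
    rw [hmax]
    have hA : previoussplitGo s.toList (focus - 1) = -1 := by
      rw [previoussplitGo, dif_neg (by omega)]
    rw [hA]
    have hslice : PySem.List.slice s.toList none (some (0:Int)) = s.toList.take 0 := by
      have := PySem.List.slice_to s.toList (le_refl (0:Int))
      simpa using this
    rw [hslice]
    simp only [List.take_zero]
    have := pv_fold_eq_goMem ([] : List Char) 0
    unfold PySem.Chars.rfind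
    simp only [List.length_nil]
    rw [this]
    simp [pvGoMem, pvMemChk]
  · have h0 : 0 ≤ focus := by omega
    have hmax : max focus 0 = focus := by omega
    rw [hmax]
    have hslice : PySem.List.slice s.toList none (some focus) = s.toList.take focus.toNat :=
      PySem.List.slice_to s.toList h0
    rw [hslice]
    set n := focus.toNat with hn
    have hfn : focus = (n : Int) := by omega
    have hnle : n ≤ s.toList.length := by
      rw [hfn] at hpre; exact_mod_cast hpre
    rw [hfn]
    have hA := pv_loopA_eq_goMem s.toList n hnle
    rw [hA]
    have hlenp : (s.toList.take n).length = n := by rw [List.length_take]; omega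
    have hB := pv_fold_eq_goMem (s.toList.take n) n
    unfold PySem.Chars.rfind
    rw [hlenp, hB]
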